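-- pv_equiv track=rewrite | github.com/CoolGuySergey/ProjectSRH | src/functions.py | CodonSplitter
-- ===== SOURCE A (Python) =====
-- def CodonSplitter(InputDict):
--
--     """
--     Partitions alignment into 1st/2nd/3rd codons.
--
--     In: (1 item) Dictionary where keys are SeqIDs and items are Seqs.
--     Out: (3 items) Dictionaries where keys are SeqIDs and items are Seqs
--     identified as 1st/2nd/3rd codons.
--     """
--
--     PosOne = [each_string[::3] for each_string in InputDict.values()]
--     PosTwo = [each_string[1::3] for each_string in InputDict.values()]
--     PosThree = [each_string[2::3] for each_string in InputDict.values()]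
--
--     PosOneDict = dict(zip(InputDict.keys(), PosOne))
--     PosTwoDict = dict(zip(InputDict.keys(), PosTwo))
--     PosThreeDict = dict(zip(InputDict.keys(), PosThree))
--
--     return PosOneDict, PosTwoDict, PosThreeDict
-- ===== SOURCE B (Python) =====
-- def CodonSplitter(InputDict):
--     PosOneDict = {}
--     PosTwoDict = {}
--     PosThreeDict = {}
--     for key, seq in InputDict.items():
--         bufs = ([], [], [])
--         for i, ch in enumerate(seq):
--             bufs[i % 3].append(ch)
--         PosOneDict[key] = ''.join(bufs[0])
--         PosTwoDict[key] = ''.join(bufs[1])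
--         PosThreeDict[key] = ''.join(bufs[2])
--     return PosOneDict, PosTwoDict, PosThreeDict
-- ===== Notes on version B (the rewrite author's own statement) =====
-- stated objective: alternative
-- what changed: Replaces the six strided-slice comprehensions plus dict(zip(...)) with a single pass over the items that walks each sequence once, dispatching characters into three per-sequence buffers by i % 3 and assigning the joined buffers into the three dicts directly.
import Mathlib
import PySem

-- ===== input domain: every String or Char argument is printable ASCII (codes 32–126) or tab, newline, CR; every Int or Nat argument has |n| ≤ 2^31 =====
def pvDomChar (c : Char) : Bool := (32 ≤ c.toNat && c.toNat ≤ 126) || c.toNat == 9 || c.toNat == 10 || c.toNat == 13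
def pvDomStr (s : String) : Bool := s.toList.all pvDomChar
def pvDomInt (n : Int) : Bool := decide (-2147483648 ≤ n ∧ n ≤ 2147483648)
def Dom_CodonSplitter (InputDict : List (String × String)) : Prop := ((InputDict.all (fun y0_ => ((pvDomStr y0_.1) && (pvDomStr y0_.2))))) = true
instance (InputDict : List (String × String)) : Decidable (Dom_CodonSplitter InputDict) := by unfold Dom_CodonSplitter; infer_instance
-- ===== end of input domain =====

-- B replaces A's six strided-slice comprehensions + dict(zip(...)) by one pass over the items
-- that walks each sequence once, dispatching characters by i % 3 into three buffers (objective: alternative).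

-- ===== PORT A =====
-- Python A: three strided-slice comprehensions over .values(), then dict(zip(keys, ...)) three times.
-- s[::3] / s[1::3] / s[2::3] → PySem.Str.slice?; step is the literal 3 ≠ 0, so slice? is always
-- `some` and the `.getD ""` default is unreachable.
def CodonSplitter (InputDict : List (String × String)) : (List (String × String)) × (List (String × String)) × (List (String × String)) :=
  let values := InputDict.map (fun kv => kv.2)
  let PosOne := values.map (fun s => (PySem.Str.slice? s none none 3).getD "")
  let PosTwo := values.map (fun s => (PySem.Str.slice? s (some 1) none 3).getD "")
  let PosThree := values.map (fun s => (PySem.Str.slice? s (some 2) none 3).getD "")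
  let keys := InputDict.map (fun kv => kv.1)
  let PosOneDict := PySem.Dict.ofList (keys.zip PosOne)
  let PosTwoDict := PySem.Dict.ofList (keys.zip PosTwo)
  let PosThreeDict := PySem.Dict.ofList (keys.zip PosThree)
  (PosOneDict.items, PosTwoDict.items, PosThreeDict.items)

-- ===== PORT B =====
-- bufs[i % 3].append(ch): tuple-indexing by i % 3 rendered as the three-way dispatch on PySem.Int.mod.
def pvStep (st : List Char × List Char × List Char) (p : Int × Char) : List Char × List Char × List Char :=
  let j := PySem.Int.mod p.1 3
  if j = 0 then (st.1 ++ [p.2], st.2.1, st.2.2)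
  else if j = 1 then (st.1, st.2.1 ++ [p.2], st.2.2)
  else (st.1, st.2.1, st.2.2 ++ [p.2])

-- loop body: walk the sequence once with enumerate, then ''.join each char buffer (= String.ofList)
-- and assign into the three dicts.
def pvStepB (st : PySem.Dict String String × PySem.Dict String String × PySem.Dict String String)
    (kv : String × String) :
    PySem.Dict String String × PySem.Dict String String × PySem.Dict String String :=
  let bufs := (PySem.List.enumerate kv.2.toList 0).foldl pvStep ([], [], [])
  (st.1.insert kv.1 (String.ofList bufs.1),
   st.2.1.insert kv.1 (String.ofList bufs.2.1),
   st.2.2.insert kv.1 (String.ofList bufs.2.2))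

def CodonSplitter_alt (InputDict : List (String × String)) : (List (String × String)) × (List (String × String)) × (List (String × String)) :=
  let final := InputDict.foldl pvStepB (PySem.Dict.empty, PySem.Dict.empty, PySem.Dict.empty)
  (final.1.items, final.2.1.items, final.2.2.items)

-- ===== PRECONDITION & SPEC =====
def Spec_CodonSplitter (InputDict : List (String × String)) (out : (List (String × String)) × (List (String × String)) × (List (String × String))) : Prop := out = CodonSplitter_alt InputDict
instance (InputDict : List (String × String)) (out : (List (String × String)) × (List (String × String)) × (List (String × String))) : Decidable (Spec_CodonSplitter InputDict out) := by unfold Spec_CodonSplitter; infer_instance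

-- ===== CLAIM (what is proved, stated in full; the proofs are below) =====
def Claim_equal_CodonSplitter : Prop := ∀ (InputDict : List (String × String)), Dom_CodonSplitter InputDict → Spec_CodonSplitter InputDict (CodonSplitter InputDict)

-- ===== LEMMAS AND PROOFS =====

-- every third element, starting with the head
def pvEvery3 {α : Type} : List α → List α
  | [] => []
  | a :: t => a :: pvEvery3 (t.drop 2)
termination_by l => l.length
decreasing_by simp

theorem pvEvery3_nil {α : Type} : pvEvery3 ([] : List α) = [] := by simp [pvEvery3]

theorem pvEvery3_cons {α : Type} (a : α) (t : List α) :
    pvEvery3 (a :: t) = a :: pvEvery3 (t.drop 2) := by simp [pvEvery3]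

theorem pvEvery3_nil_of_le {α : Type} (xs : List α) (s : Nat) (h : xs.length ≤ s) :
    pvEvery3 (xs.drop s) = [] := by
  rw [List.drop_eq_nil_of_le h, pvEvery3_nil]

theorem pvCore {α : Type} (xs : List α) (m : Nat) :
    ∀ s : Nat, xs.length ≤ s + 3*m →
    (List.range ((xs.length - s + 2)/3)).filterMap (fun k => xs[s+3*k]?) = pvEvery3 (xs.drop s) := by
  induction m with
  | zero =>
    intro s h
    simp only [Nat.mul_zero, Nat.add_zero] at h
    rw [pvEvery3_nil_of_le xs s h]
    have : (xs.length - s + 2)/3 = 0 := by omega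
    rw [this]; rfl
  | succ n ih =>
    intro s h
    by_cases hs : xs.length ≤ s
    · rw [pvEvery3_nil_of_le xs s hs]
      have : (xs.length - s + 2)/3 = 0 := by omega
      rw [this]; rfl
    · have hlt : s < xs.length := by omega
      have hcnt : (xs.length - s + 2)/3 = (xs.length - (s+3) + 2)/3 + 1 := by omega
      rw [hcnt, List.range_succ_eq_map, List.filterMap_cons, List.filterMap_map]
      have h0 : xs[s+3*0]? = some xs[s] := by
        simp [hlt]
      rw [h0]
      have hfun : List.filterMap ((fun k => xs[s+3*k]?) ∘ Nat.succ) (List.range ((xs.length - (s+3) + 2)/3))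
          = List.filterMap (fun k => xs[(s+3)+3*k]?) (List.range ((xs.length - (s+3) + 2)/3)) := by
        apply List.filterMap_congr
        intro k _
        simp only [Function.comp]
        congr 1
        omega
      rw [hfun, ih (s+3) (by omega)]
      rw [List.drop_eq_getElem_cons hlt, pvEvery3_cons, List.drop_drop]

theorem pvSliceAt {α : Type} (xs : List α) (r : Nat) :
    PySem.List.slice? xs (some (r:Int)) none 3 = some (pvEvery3 (xs.drop r)) := by
  have hlt : ¬ ((r:Int) < 0) := by omega
  simp only [PySem.List.slice?, PySem.List.sliceIndices, if_neg hlt,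
    show ¬ ((3:Int) < 0) from by norm_num, if_false, show ¬ ((3:Int) = 0) from by norm_num,
    show ((0:Int) < 3) from by norm_num, if_true]
  have hmin : min (r:Int) (xs.length:Int) = ((min r xs.length : Nat) : Int) := by omega
  rw [hmin]
  have hcnt : (if ((min r xs.length : Nat) : Int) < (xs.length:Int) then
      ((((xs.length:Int) - ((min r xs.length : Nat):Int)) + 3 - 1) / 3).toNat else 0)
      = (xs.length - min r xs.length + 2)/3 := by
    split_ifs with h
    · omega
    · omega
  rw [hcnt]
  have hdrop : pvEvery3 (xs.drop (min r xs.length)) = pvEvery3 (xs.drop r) := by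
    rcases le_total r xs.length with h | h
    · rw [Nat.min_eq_left h]
    · rw [Nat.min_eq_right h, pvEvery3_nil_of_le xs r h, pvEvery3_nil_of_le xs xs.length le_rfl]
  rw [← hdrop, ← pvCore xs xs.length (min r xs.length) (by omega)]
  congr 1

theorem pvSlice0 {α : Type} (xs : List α) :
    PySem.List.slice? xs none none 3 = some (pvEvery3 xs) := by
  simp only [PySem.List.slice?, PySem.List.sliceIndices,
    show ¬ ((3:Int) < 0) from by norm_num, if_false, show ¬ ((3:Int) = 0) from by norm_num,
    show ((0:Int) < 3) from by norm_num, if_true]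
  have hcnt : (if (0:Int) < (xs.length:Int) then
      ((((xs.length:Int) - 0) + 3 - 1) / 3).toNat else 0) = (xs.length - 0 + 2)/3 := by
    split_ifs with h
    · omega
    · omega
  rw [hcnt]
  have := pvCore xs xs.length 0 (by omega)
  rw [List.drop_zero] at this
  rw [← this]
  congr 1

theorem pvFold (cs : List Char) : ∀ (i : Int) (b0 b1 b2 : List Char), 0 ≤ i →
    (PySem.List.enumerate cs i).foldl pvStep (b0, b1, b2) =
      (if i % 3 = 0 then (b0 ++ pvEvery3 cs, b1 ++ pvEvery3 (cs.drop 1), b2 ++ pvEvery3 (cs.drop 2))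
       else if i % 3 = 1 then (b0 ++ pvEvery3 (cs.drop 2), b1 ++ pvEvery3 cs, b2 ++ pvEvery3 (cs.drop 1))
       else (b0 ++ pvEvery3 (cs.drop 1), b1 ++ pvEvery3 (cs.drop 2), b2 ++ pvEvery3 cs)) := by
  induction cs with
  | nil =>
    intro i b0 b1 b2 _
    simp [PySem.List.enumerate, pvEvery3_nil]
  | cons a t ih =>
    intro i b0 b1 b2 hi
    have he3 := pvEvery3_cons a t
    have hd1 : (a :: t).drop 1 = t := rfl
    have hd2 : (a :: t).drop 2 = t.drop 1 := by
      cases t <;> simp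
    simp only [PySem.List.enumerate, List.foldl_cons]
    rcases (show i % 3 = 0 ∨ i % 3 = 1 ∨ i % 3 = 2 by omega) with h | h | h
    · have hstep : pvStep (b0, b1, b2) (i, a) = (b0 ++ [a], b1, b2) := by
        simp [pvStep, h]
      rw [hstep, ih (i+1) _ _ _ (by omega)]
      have h1 : (i+1) % 3 = 1 := by omega
      simp [h, h1, he3, hd1, hd2]
    · have hstep : pvStep (b0, b1, b2) (i, a) = (b0, b1 ++ [a], b2) := by
        simp [pvStep, h]
      rw [hstep, ih (i+1) _ _ _ (by omega)]
      have h1 : (i+1) % 3 = 2 := by omega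
      simp [h, h1, he3, hd1, hd2]
    · have hstep : pvStep (b0, b1, b2) (i, a) = (b0, b1, b2 ++ [a]) := by
        simp [pvStep, h]
      rw [hstep, ih (i+1) _ _ _ (by omega)]
      have h1 : (i+1) % 3 = 0 := by omega
      simp [h, h1, he3, hd1, hd2]

-- B's per-sequence buffers, as the three codon-position strings
def pvVal0 (s : String) : String := String.ofList (pvEvery3 s.toList)
def pvVal1 (s : String) : String := String.ofList (pvEvery3 (s.toList.drop 1))
def pvVal2 (s : String) : String := String.ofList (pvEvery3 (s.toList.drop 2))

theorem pvBufs (s : String) :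
    (PySem.List.enumerate s.toList 0).foldl pvStep ([], [], []) =
      (pvEvery3 s.toList, pvEvery3 (s.toList.drop 1), pvEvery3 (s.toList.drop 2)) := by
  rw [pvFold s.toList 0 [] [] [] le_rfl]
  norm_num

theorem pvTripleFold (l : List (String × String)) :
    ∀ d1 d2 d3 : PySem.Dict String String,
    l.foldl pvStepB (d1, d2, d3) =
      (l.foldl (fun d kv => d.insert kv.1 (pvVal0 kv.2)) d1,
       l.foldl (fun d kv => d.insert kv.1 (pvVal1 kv.2)) d2,
       l.foldl (fun d kv => d.insert kv.1 (pvVal2 kv.2)) d3) := by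
  induction l with
  | nil => intro d1 d2 d3; rfl
  | cons kv t ih =>
    intro d1 d2 d3
    simp only [List.foldl_cons]
    rw [show pvStepB (d1, d2, d3) kv =
        (d1.insert kv.1 (pvVal0 kv.2), d2.insert kv.1 (pvVal1 kv.2), d3.insert kv.1 (pvVal2 kv.2)) by
      simp only [pvStepB, pvBufs, pvVal0, pvVal1, pvVal2]]
    exact ih _ _ _

theorem pvA0 (s : String) : (PySem.Str.slice? s none none 3).getD "" = pvVal0 s := by
  simp only [PySem.Str.slice?, PySem.Chars.slice?_eq_listSlice?, pvSlice0, Option.map_some,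
    Option.getD_some, pvVal0]

theorem pvA1 (s : String) : (PySem.Str.slice? s (some 1) none 3).getD "" = pvVal1 s := by
  simp only [PySem.Str.slice?, PySem.Chars.slice?_eq_listSlice?,
    show ((1:Int)) = ((1:Nat):Int) by norm_num, pvSliceAt, Option.map_some, Option.getD_some, pvVal1]

theorem pvA2 (s : String) : (PySem.Str.slice? s (some 2) none 3).getD "" = pvVal2 s := by
  simp only [PySem.Str.slice?, PySem.Chars.slice?_eq_listSlice?,
    show ((2:Int)) = ((2:Nat):Int) by norm_num, pvSliceAt, Option.map_some, Option.getD_some, pvVal2]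

theorem pvDictOf (l : List (String × String)) (g : String → String) :
    PySem.Dict.ofList ((l.map (fun kv => kv.1)).zip (l.map (fun kv => g kv.2))) =
      l.foldl (fun d kv => d.insert kv.1 (g kv.2)) PySem.Dict.empty := by
  rw [List.zip_map']
  simp only [PySem.Dict.ofList, PySem.Dict.update, List.foldl_map]

-- ===== VERDICT (by name: the statement is the Claim_ definition above) =====
theorem CodonSplitter_spec : Claim_equal_CodonSplitter := by
  intro InputDict _
  unfold Spec_CodonSplitter CodonSplitter CodonSplitter_alt
  simp only [List.map_map, Function.comp_def]
  rw [pvTripleFold]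
  rw [show (InputDict.map (fun kv => (PySem.Str.slice? kv.2 none none 3).getD ""))
      = InputDict.map (fun kv => pvVal0 kv.2) by simp [pvA0]]
  rw [show (InputDict.map (fun kv => (PySem.Str.slice? kv.2 (some 1) none 3).getD ""))
      = InputDict.map (fun kv => pvVal1 kv.2) by simp [pvA1]]
  rw [show (InputDict.map (fun kv => (PySem.Str.slice? kv.2 (some 2) none 3).getD ""))
      = InputDict.map (fun kv => pvVal2 kv.2) by simp [pvA2]]
  rw [pvDictOf, pvDictOf, pvDictOf]
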